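-- pv_equiv track=rewrite | github.com/xunishere/RE-EAS | repair/rag_consens.py | _tokenize_task
-- ===== SOURCE A (Python) =====
-- from typing import Any, Dict, Iterable, List, Optional, Sequence, Tuple
--
-- def _tokenize_task(text: str) -> List[str]:
--     """Tokenize task text using a simple lowercase split."""
--     clean = (
--         text.lower()
--         .replace(".", " ")
--         .replace(",", " ")
--         .replace("(", " ")
--         .replace(")", " ")
--     )
--     return [token for token in clean.split() if token]
-- ===== SOURCE B (Python) =====
-- from typing import List
--
-- def _tokenize_task(text: str) -> List[str]:
--     """Tokenize task text: one pass, accumulating tokens between separators."""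
--     tokens: List[str] = []
--     buf = ""
--     for ch in text.lower():
--         if ch in ".,()" or ch.isspace():
--             if buf:
--                 tokens.append(buf)
--                 buf = ""
--         else:
--             buf += ch
--     if buf:
--         tokens.append(buf)
--     return tokens
-- ===== Notes on version B (the rewrite author's own statement) =====
-- stated objective: alternative
-- what changed: Replaced the four-replace chain plus split()+filter with a single state-machine pass that accumulates a token buffer and flushes it at each punctuation-or-whitespace separator.
import Mathlib
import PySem

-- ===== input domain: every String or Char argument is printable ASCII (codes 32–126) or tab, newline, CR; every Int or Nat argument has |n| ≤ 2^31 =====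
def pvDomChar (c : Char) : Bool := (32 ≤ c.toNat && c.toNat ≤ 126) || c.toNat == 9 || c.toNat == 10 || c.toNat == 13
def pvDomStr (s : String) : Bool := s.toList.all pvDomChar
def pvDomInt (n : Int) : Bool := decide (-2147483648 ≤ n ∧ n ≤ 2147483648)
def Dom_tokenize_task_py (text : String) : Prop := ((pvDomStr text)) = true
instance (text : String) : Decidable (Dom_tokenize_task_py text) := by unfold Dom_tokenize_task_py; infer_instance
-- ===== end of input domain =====

-- B replaces A's replace-chain-plus-split with one accumulating state-machine pass over the lowered text; same cost, different decomposition.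

-- ===== PORT A =====
def tokenize_task_py (text : String) : List String :=
  let clean :=
    PySem.Str.replace
      (PySem.Str.replace
        (PySem.Str.replace
          (PySem.Str.replace (PySem.Str.lower text) "." " ")
          "," " ")
        "(" " ")
      ")" " "
  (PySem.Str.split₀ clean).filter (fun token => !(token == ""))

-- ===== PORT B =====
-- separator test: ch in ".,()" or ch.isspace()
def tokB_isSep (c : Char) : Bool :=
  c == '.' || c == ',' || c == '(' || c == ')' || PySem.Chars.isspace c

-- the loop over text.lower(), state = (tokens so far, current buffer)
def tokB_go : List Char → List Char → List String → List String
  | [], buf, tokens => if buf = [] then tokens else tokens ++ [String.ofList buf]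
  | c :: rest, buf, tokens =>
    if tokB_isSep c then
      if buf = [] then tokB_go rest [] tokens
      else tokB_go rest [] (tokens ++ [String.ofList buf])
    else tokB_go rest (buf ++ [c]) tokens

def tokenize_task_py_alt (text : String) : List String :=
  tokB_go (PySem.Str.lower text).toList [] []

-- ===== PRECONDITION & SPEC =====
def Spec_tokenize_task_py (text : String) (out : List String) : Prop := out = tokenize_task_py_alt text
instance (text : String) (out : List String) : Decidable (Spec_tokenize_task_py text out) := by unfold Spec_tokenize_task_py; infer_instance

-- ===== CLAIM (what is proved, stated in full; the proofs are below) =====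
def Claim_equal_tokenize_task_py : Prop := ∀ (text : String), Dom_tokenize_task_py text → Spec_tokenize_task_py text (tokenize_task_py text)

-- ===== LEMMAS AND PROOFS =====

-- replacing a single char by a single char is a map
theorem replace_single_go (o n : Char) :
    ∀ (l : List Char) (fuel : Nat) (acc : List Char), l.length ≤ fuel →
      PySem.Chars.replace.go [o] [n] fuel l acc
        = acc.reverse ++ l.map (fun c => if c = o then n else c)
  | [], 0, acc, _ => by simp [PySem.Chars.replace.go]
  | [], fuel + 1, acc, _ => by simp [PySem.Chars.replace.go]
  | c :: t, fuel + 1, acc, h => by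
    simp only [PySem.Chars.replace.go, List.isPrefixOf, List.map]
    by_cases hc : o = c
    · subst hc
      simp only [BEq.rfl, Bool.true_and, if_true, List.length_cons, List.length_nil,
        List.drop_succ_cons, List.drop_zero, List.reverse_cons, List.reverse_nil, List.nil_append]
      rw [replace_single_go o n t fuel (acc := [n] ++ acc) (by simpa using Nat.le_of_succ_le_succ h)]
      simp
    · have : (o == c) = false := by simp [hc]
      simp only [this, Bool.false_and, if_neg (by simp [Ne.symm hc] : ¬ c = o), Bool.false_eq_true,
        if_false]
      rw [replace_single_go o n t fuel (acc := c :: acc) (by simpa using Nat.le_of_succ_le_succ h)]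
      simp

theorem replace_single (cs : List Char) (o n : Char) :
    PySem.Chars.replace cs [o] [n] = cs.map (fun c => if c = o then n else c) := by
  rw [PySem.Chars.replace]
  simp only [List.isEmpty_cons, Bool.false_eq_true, if_false]
  rw [replace_single_go o n cs cs.length [] le_rfl]
  simp

-- every token produced by split₀.go is nonempty, given the accumulator's are
theorem split₀_go_nonempty (l : List Char) (cur : List Char) (acc : List (List Char))
    (h : ∀ t ∈ acc, t ≠ []) : ∀ t ∈ PySem.Chars.split₀.go l cur acc, t ≠ [] := by
  induction l generalizing cur acc with
  | nil =>
    simp only [PySem.Chars.split₀.go]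
    split
    · simpa using h
    · next hcur =>
      intro t ht
      simp only [List.mem_reverse, List.mem_cons] at ht
      rcases ht with h1 | h2
      · subst h1; simpa [List.isEmpty_iff] using hcur
      · exact h t h2
  | cons c rest ih =>
    simp only [PySem.Chars.split₀.go]
    split
    · split
      · exact ih [] acc h
      · next hcur =>
        refine ih [] (cur.reverse :: acc) ?_
        intro t ht
        rcases List.mem_cons.mp ht with h1 | h2
        · subst h1; simpa [List.isEmpty_iff] using hcur
        · exact h t h2
    · exact ih (c :: cur) acc h

-- the state-machine pass equals split₀ after mapping separators to spaces
theorem tokB_go_split (f : Char → Char)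
    (hf : ∀ c, PySem.Chars.isspace (f c) = tokB_isSep c)
    (hid : ∀ c, tokB_isSep c = false → f c = c) :
    ∀ (l buf : List Char) (out : List String),
      (PySem.Chars.split₀.go (l.map f) buf.reverse ((out.map String.toList).reverse)).map String.ofList
        = tokB_go l buf out := by
  intro l
  induction l with
  | nil =>
    intro buf out
    simp only [List.map_nil, PySem.Chars.split₀.go, tokB_go]
    by_cases hb : buf = []
    · subst hb
      simp [Function.comp_def]
    · have h1 : buf.reverse.isEmpty = false := by simp [hb]
      simp [h1, hb, Function.comp_def]
  | cons c rest ih =>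
    intro buf out
    simp only [List.map_cons, PySem.Chars.split₀.go, tokB_go, hf c]
    by_cases hs : tokB_isSep c = true
    · simp only [hs, if_true]
      by_cases hb : buf = []
      · subst hb
        simp only [List.reverse_nil, List.isEmpty_nil, if_true]
        exact ih [] out
      · have h1 : buf.reverse.isEmpty = false := by simp [hb]
        simp only [h1, Bool.false_eq_true, if_false, hb, List.reverse_reverse]
        have := ih [] (out ++ [String.ofList buf])
        simpa [Function.comp] using this
    · have hs' : tokB_isSep c = false := by simpa using hs
      simp only [hs', Bool.false_eq_true, if_false, hid c hs']
      have := ih (buf ++ [c]) out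
      simpa using this

-- ===== VERDICT (by name: the statement is the Claim_ definition above) =====
-- the pointwise effect of the four-replace chain
theorem chain_eq_map (c : Char) :
    (fun c => if c = ')' then ' ' else c)
      ((fun c => if c = '(' then ' ' else c)
        ((fun c => if c = ',' then ' ' else c)
          ((fun c => if c = '.' then ' ' else c) c)))
      = (if c = '.' ∨ c = ',' ∨ c = '(' ∨ c = ')' then ' ' else c) := by
  by_cases h1 : c = '.' <;> by_cases h2 : c = ',' <;> by_cases h3 : c = '(' <;>
    by_cases h4 : c = ')' <;> simp_all

theorem tokenize_task_py_spec : Claim_equal_tokenize_task_py := by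
  unfold Claim_equal_tokenize_task_py
  intro text _
  unfold Spec_tokenize_task_py tokenize_task_py tokenize_task_py_alt
  set fRep : Char → Char := fun c => if c = '.' ∨ c = ',' ∨ c = '(' ∨ c = ')' then ' ' else c with hfRep
  have hf : ∀ c, PySem.Chars.isspace (fRep c) = tokB_isSep c := by
    intro c
    by_cases h : c = '.' ∨ c = ',' ∨ c = '(' ∨ c = ')'
    · have : tokB_isSep c = true := by
        rcases h with h | h | h | h <;> simp [tokB_isSep, h]
      rw [this, hfRep]
      simp only [h, if_true]
      decide
    · push Not at h
      obtain ⟨h1, h2, h3, h4⟩ := h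
      simp [hfRep, tokB_isSep, h1, h2, h3, h4]
  have hid : ∀ c, tokB_isSep c = false → fRep c = c := by
    intro c hc
    simp only [tokB_isSep, Bool.or_eq_false_iff, beq_eq_false_iff_ne] at hc
    simp [hfRep, hc.1.1.1.1, hc.1.1.1.2, hc.1.1.2, hc.1.2]
  have hclean :
      (PySem.Str.replace
        (PySem.Str.replace
          (PySem.Str.replace
            (PySem.Str.replace (PySem.Str.lower text) "." " ")
            "," " ")
          "(" " ")
        ")" " ").toList = (PySem.Chars.lower text.toList).map fRep := by
    simp only [PySem.Str.toList_replace, PySem.Str.toList_lower]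
    have hdot : (".".toList) = ['.'] := rfl
    have hcom : (",".toList) = [','] := rfl
    have hop : ("(".toList) = ['('] := rfl
    have hcl : (")".toList) = [')'] := rfl
    have hsp : (" ".toList) = [' '] := rfl
    rw [hdot, hcom, hop, hcl, hsp, replace_single, replace_single, replace_single,
      replace_single]
    simp only [List.map_map]
    apply List.map_congr_left
    intro c _
    simpa [Function.comp] using chain_eq_map c
  have hsplit :
      PySem.Str.split₀
        (PySem.Str.replace
          (PySem.Str.replace
            (PySem.Str.replace
              (PySem.Str.replace (PySem.Str.lower text) "." " ")
              "," " ")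
            "(" " ")
          ")" " ")
        = (PySem.Chars.split₀ ((PySem.Chars.lower text.toList).map fRep)).map String.ofList := by
    rw [PySem.Str.split₀, hclean]
  show (PySem.Str.split₀
      (PySem.Str.replace
        (PySem.Str.replace
          (PySem.Str.replace
            (PySem.Str.replace (PySem.Str.lower text) "." " ")
            "," " ")
          "(" " ")
        ")" " ")).filter (fun token => !(token == ""))
      = tokB_go (PySem.Str.lower text).toList [] []
  rw [hsplit]
  have hne : ∀ t ∈ (PySem.Chars.split₀ ((PySem.Chars.lower text.toList).map fRep)).map
      String.ofList, (!(t == "")) = true := by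
    intro t ht
    rcases List.mem_map.mp ht with ⟨cs, hcs, rfl⟩
    have := split₀_go_nonempty ((PySem.Chars.lower text.toList).map fRep) [] []
      (by simp) cs (by simpa [PySem.Chars.split₀] using hcs)
    simp only [Bool.not_eq_eq_eq_not, Bool.not_true, beq_eq_false_iff_ne, ne_eq]
    intro hcon
    exact this (by simpa using congrArg String.toList hcon)
  rw [List.filter_eq_self.mpr hne]
  have := tokB_go_split fRep hf hid (PySem.Chars.lower text.toList) [] []
  simp only [List.reverse_nil, List.map_nil] at this
  unfold PySem.Chars.split₀
  rw [this, PySem.Str.toList_lower]
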